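-- pv_equiv track=rewrite | github.com/taehwan920/Algorithm | programmers/number_game.py | solution
-- ===== SOURCE A (Python) =====
-- def solution(A, B):
--     A.sort()
--     B.sort()
--     score = 0
--     for i in range(len(A)):
--         for j in range(len(B)):
--             if A[i] < B[j]:
--                 score += 1
--                 B.pop(j)
--                 break
--     return score
-- ===== SOURCE B (Python) =====
-- def solution(A, B):
--     # Two-pointer greedy over the two sorted lists (O((n+m) log) instead of A's
--     # quadratic inner rescans). Return-value equivalence only: A also pops the
--     # matched elements out of B in place, B leaves B's contents (sorted) intact.
--     A.sort()
--     B.sort()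
--     score = 0
--     j = 0
--     for a in A:
--         while j < len(B) and B[j] <= a:
--             j += 1
--         if j < len(B):
--             score += 1
--             j += 1
--     return score
-- ===== Notes on version B (the rewrite author's own statement) =====
-- stated objective: faster
-- what changed: Replaced the per-element rescan of B from index 0 with a popped list (quadratic) by a single two-pointer sweep over the two sorted lists that never moves the B pointer backwards.
import Mathlib
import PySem

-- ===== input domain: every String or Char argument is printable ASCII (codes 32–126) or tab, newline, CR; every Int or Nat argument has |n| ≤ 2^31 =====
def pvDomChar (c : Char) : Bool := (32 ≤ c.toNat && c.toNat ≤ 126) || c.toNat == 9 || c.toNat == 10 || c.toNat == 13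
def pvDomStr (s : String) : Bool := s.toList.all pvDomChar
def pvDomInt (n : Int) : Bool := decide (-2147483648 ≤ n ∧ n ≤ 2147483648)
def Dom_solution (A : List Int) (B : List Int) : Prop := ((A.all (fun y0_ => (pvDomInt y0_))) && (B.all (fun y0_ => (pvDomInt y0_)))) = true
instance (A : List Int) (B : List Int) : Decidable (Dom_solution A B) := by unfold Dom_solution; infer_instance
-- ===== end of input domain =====

-- B replaces A's quadratic rescan-and-pop of B by a two-pointer sweep over the sorted
-- lists (asymptotically faster). Return-value equivalence only: Python A additionally
-- sorts both arguments and pops matched elements out of B in place; Python B sorts both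
-- in place but does not pop.


-- ===== PORT A =====
-- inner loop: scan B left to right (j = 0,1,…); at the first b with a < b, pop it and
-- break (some B-without-b); if none is found the inner loop falls through (none)
def popFirstGreater (a : Int) : List Int → Option (List Int)
  | [] => none
  | b :: bs => if a < b then some bs else (popFirstGreater a bs).map (b :: ·)

-- outer loop over the sorted A, carrying the mutated B and score
def solutionLoop : List Int → List Int → Int → Int
  | [], _, score => score
  | a :: as, B, score =>
    match popFirstGreater a B with
    | some B' => solutionLoop as B' (score + 1)
    | none => solutionLoop as B score

def solution (A : List Int) (B : List Int) : Int :=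
  solutionLoop (PySem.List.sorted A (fun x => x) false) (PySem.List.sorted B (fun x => x) false) 0

-- ===== PORT B =====
-- for a in sorted(A): advance j past the B-elements ≤ a (dropWhile on the remaining
-- suffix of sorted(B)); if anything is left, count it and advance past it too
def solutionAltLoop : List Int → List Int → Int → Int
  | [], _, score => score
  | a :: as, bs, score =>
    match bs.dropWhile (fun b => decide (b ≤ a)) with
    | [] => solutionAltLoop as [] score
    | _ :: rest => solutionAltLoop as rest (score + 1)

def solution_alt (A : List Int) (B : List Int) : Int :=
  solutionAltLoop (PySem.List.sorted A (fun x => x) false) (PySem.List.sorted B (fun x => x) false) 0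

-- ===== PRECONDITION & SPEC =====
def Spec_solution (A : List Int) (B : List Int) (out : Int) : Prop := out = solution_alt A B
instance (A : List Int) (B : List Int) (out : Int) : Decidable (Spec_solution A B out) := by unfold Spec_solution; infer_instance

-- ===== CLAIM (what is proved, stated in full; the proofs are below) =====
def Claim_equal_solution : Prop := ∀ (A : List Int) (B : List Int), Dom_solution A B → Spec_solution A B (solution A B)

-- ===== LEMMAS AND PROOFS =====

-- popping through a prefix none of whose elements beats a
lemma popFirstGreater_append (a : Int) (P bs : List Int) (hP : ∀ p ∈ P, p ≤ a) :
    popFirstGreater a (P ++ bs) = (popFirstGreater a bs).map (P ++ ·) := by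
  induction P with
  | nil => simp [Option.map_id']
  | cons p P ih =>
    have hpa : ¬ a < p := not_lt.mpr (hP p (by simp))
    simp only [List.cons_append, popFirstGreater, if_neg hpa,
      ih (fun q hq => hP q (by simp [hq]))]
    cases popFirstGreater a bs <;> simp

-- the first element beating a is the head of dropWhile (· ≤ a); the pop keeps the prefix
lemma popFirstGreater_eq (a : Int) (bs : List Int) :
    popFirstGreater a bs =
      match bs.dropWhile (fun b => decide (b ≤ a)) with
      | [] => none
      | _ :: rest => some (bs.takeWhile (fun b => decide (b ≤ a)) ++ rest) := by
  induction bs with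
  | nil => simp [popFirstGreater]
  | cons b bs ih =>
    by_cases h : a < b
    · have hb : ¬ b ≤ a := not_le.mpr h
      simp [popFirstGreater, h, List.dropWhile, List.takeWhile, hb]
    · have hb : b ≤ a := not_lt.mp h
      simp only [popFirstGreater, if_neg h, List.dropWhile, List.takeWhile, decide_eq_true hb,
        ih]
      cases hdw : bs.dropWhile (fun b => decide (b ≤ a)) <;> simp

-- when no remaining element of B beats any remaining element of A, nothing more is scored
lemma solutionLoop_const (as : List Int) :
    ∀ bs s, (∀ b ∈ bs, ∀ a ∈ as, b ≤ a) → solutionLoop as bs s = s := by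
  induction as with
  | nil => intro bs s _; rfl
  | cons a as ih =>
    intro bs s h
    have hnone : popFirstGreater a bs = none := by
      have : ∀ p ∈ bs, p ≤ a := fun p hp => h p hp a (by simp)
      have := popFirstGreater_append a bs [] this
      simpa [popFirstGreater] using this
    simp only [solutionLoop, hnone]
    exact ih bs s (fun b hb a' ha' => h b hb a' (by simp [ha']))

-- B's loop does nothing once its B-suffix is empty
lemma solutionAltLoop_nil (as : List Int) (s : Int) : solutionAltLoop as [] s = s := by
  induction as with
  | nil => rfl
  | cons a as ih => simpa [solutionAltLoop] using ih

-- MAIN INVARIANT: A's loop state is B's suffix bs preceded by a junk prefix P of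
-- elements ≤ every remaining a (hence never matched again); the scores advance in step
lemma loop_agree (as : List Int) :
    ∀ P bs s, as.Pairwise (· ≤ ·) → (∀ p ∈ P, ∀ a ∈ as, p ≤ a) →
      solutionLoop as (P ++ bs) s = solutionAltLoop as bs s := by
  induction as with
  | nil => intro P bs s _ _; rfl
  | cons a as ih =>
    intro P bs s hsorted hP
    have haas : ∀ a' ∈ as, a ≤ a' := (List.pairwise_cons.mp hsorted).1
    have hsorted' : as.Pairwise (· ≤ ·) := (List.pairwise_cons.mp hsorted).2
    have hPa : ∀ p ∈ P, p ≤ a := fun p hp => hP p hp a (by simp)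
    have hpopbs := popFirstGreater_eq a bs
    cases hdw : bs.dropWhile (fun b => decide (b ≤ a)) with
    | nil =>
      rw [hdw] at hpopbs
      have hpop := popFirstGreater_append a P bs hPa
      rw [hpopbs] at hpop
      have hballe : ∀ b ∈ bs, b ≤ a := by
        intro b hb
        have h := (List.dropWhile_eq_nil_iff).mp hdw
        simpa using h b hb
      have hrhs : solutionAltLoop (a :: as) bs s = s := by
        simp [solutionAltLoop, hdw, solutionAltLoop_nil]
      rw [hrhs]
      simp only [solutionLoop, hpop]
      exact solutionLoop_const as (P ++ bs) s (by
        intro b hb a' ha'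
        rcases List.mem_append.mp hb with h1 | h1
        · exact hP b h1 a' (by simp [ha'])
        · exact le_trans (hballe b h1) (haas a' ha'))
    | cons b rest =>
      rw [hdw] at hpopbs
      have hpop := popFirstGreater_append a P bs hPa
      rw [hpopbs] at hpop
      have hT : ∀ p ∈ bs.takeWhile (fun b => decide (b ≤ a)), p ≤ a := by
        intro p hp
        simpa using List.mem_takeWhile_imp hp
      have hP' : ∀ p ∈ P ++ bs.takeWhile (fun b => decide (b ≤ a)), ∀ a' ∈ as, p ≤ a' := by
        intro p hp a' ha'
        rcases List.mem_append.mp hp with h1 | h1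
        · exact hP p h1 a' (by simp [ha'])
        · exact le_trans (hT p h1) (haas a' ha')
      simp only [solutionLoop, hpop, Option.map_some]
      rw [show P ++ (bs.takeWhile (fun b => decide (b ≤ a)) ++ rest)
            = (P ++ bs.takeWhile (fun b => decide (b ≤ a))) ++ rest by simp,
        ih _ rest (s + 1) hsorted' hP']
      simp [solutionAltLoop, hdw]

-- ===== VERDICT (by name: the statement is the Claim_ definition above) =====
theorem solution_spec : Claim_equal_solution := by
  intro A B _
  show solution A B = solution_alt A B
  unfold solution solution_alt
  exact loop_agree _ [] _ 0 (by simpa using PySem.List.sorted_pairwise A (fun x => x)) (by simp)
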